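-- pv_equiv track=rewrite | github.com/Team-8-Discrete-computer-project/project_topic_6 | modules/equality_relation.py | equality_classes
-- ===== SOURCE A (Python) =====
-- def equality_classes(relation: list) -> list:
--     '''
--     Return list of lists, each list - equality class of given relation.
--     >>> equality_classes ([[1, 0, 0, 0],\
--                            [0, 1, 0, 0],\
--                            [0, 0, 1, 0],\
--                            [0, 0, 0, 1]])
--     [[0], [1], [2], [3]]
--     >>> equality_classes ([[1, 1, 0, 0],\
--                            [1, 1, 0, 0],\
--                            [0, 0, 1, 1],\
--                            [0, 0, 1, 1]])
--     [[0, 1], [2, 3]]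
--     >>> equality_classes ([[1, 1, 1, 1],\
--                            [1, 1, 1, 1],\
--                            [1, 1, 1, 1],\
--                            [1, 1, 1, 1]])
--     [[0, 1, 2, 3]]
--     '''
--     classes_list = []
--     for i in range(len(relation)):
--         for j in range(len(relation)):
--             if relation[i][j]:
--                 if not classes_list:  # creating first class
--                     if i != j:  # we dont need class as [0, 0]
--                         new_class = [i, j]
--                     else:
--                         new_class = [i]
--                     classes_list.append(new_class)
--                 else:  # if we have some classes (at least one)
--                     count = 0
--                     for our_class in classes_list:  # checking each class
--                         if i in our_class and j not in our_class:
--                             our_class.append(j)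
--                             break
--                         elif j in our_class and i not in our_class:
--                             our_class.append(i)
--                             break
--                         elif i in our_class and j in our_class:
--                             break
--                         else:
--                             count += 1
--                             # counter for finding out pair (i,j) which has separate class
--                     if count == len(classes_list):
--                         if i != j:
--                             new_class = [i, j]
--                         else:
--                             new_class = [i]
--                         classes_list.append(new_class)
--     return classes_list
-- ===== SOURCE B (Python) =====
-- def equality_classes(relation: list) -> list:
--     '''Event-log formulation: the scan never maintains class lists at all.
--     Pass 1 walks the pairs once, keeping only an element -> first-class-index
--     map and a count of classes, and records a flat log of (class, element)
--     append events.  Pass 2 reconstructs the classes by bucketing the log.'''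
--     n = len(relation)
--     first = {}            # element -> index of first class containing it
--     nclasses = 0
--     events = []           # (class index, element), in append order
--     for i in range(n):
--         row = relation[i]
--         for j in range(n):
--             if row[j]:
--                 fi = first.get(i)
--                 fj = first.get(j)
--                 if fi is None and fj is None:
--                     first[i] = first[j] = nclasses
--                     if i == j:
--                         events.append((nclasses, i))
--                     else:
--                         events.append((nclasses, i))
--                         events.append((nclasses, j))
--                     nclasses += 1
--                 elif fj is None or (fi is not None and fi < fj):
--                     events.append((fi, j))
--                     first[j] = fi
--                 elif fi is None or fj < fi:
--                     events.append((fj, i))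
--                     first[i] = fj
--     buckets = [[] for _ in range(nclasses)]
--     for k, x in events:
--         buckets[k].append(x)
--     return buckets
-- ===== Notes on version B (the rewrite author's own statement) =====
-- stated objective: faster
-- what changed: B never maintains class lists during the scan: a single pass over the pairs records a flat log of (class, element) events, driven only by an element-to-first-class-index map and a class counter, and a second bucketing pass reconstructs the classes from the log, so A's inner scan over all existing classes (with membership scans inside each class) disappears.
import Mathlib
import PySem

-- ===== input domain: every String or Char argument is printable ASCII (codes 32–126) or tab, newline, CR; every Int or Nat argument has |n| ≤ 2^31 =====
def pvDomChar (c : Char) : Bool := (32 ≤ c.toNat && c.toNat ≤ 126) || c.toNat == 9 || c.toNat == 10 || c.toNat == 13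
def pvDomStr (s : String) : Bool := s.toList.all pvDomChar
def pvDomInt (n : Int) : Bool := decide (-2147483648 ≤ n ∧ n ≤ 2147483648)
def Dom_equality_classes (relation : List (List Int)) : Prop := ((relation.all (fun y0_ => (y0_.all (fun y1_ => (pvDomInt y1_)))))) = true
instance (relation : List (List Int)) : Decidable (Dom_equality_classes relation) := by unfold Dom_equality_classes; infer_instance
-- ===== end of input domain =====

-- B never maintains class lists during the scan: one pass over the pairs records a flat
-- log of (class, element) events guided by an element→first-class map, and a second pass
-- buckets the log into the classes; measured faster. Return values only (A mutates nothing).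

-- ===== PORT A =====
-- new_class = [i, j] if i != j else [i]
def pvA_new (i j : Int) : List Int := if i ≠ j then [i, j] else [i]

-- the `for our_class in classes_list` loop with its three break branches;
-- `none` = no break happened (count == len(classes_list))
def pvA_scan : List (List Int) → Int → Int → Option (List (List Int))
  | [], _, _ => none
  | c :: rest, i, j =>
    if c.contains i && !c.contains j then some ((c ++ [j]) :: rest)
    else if c.contains j && !c.contains i then some ((c ++ [i]) :: rest)
    else if c.contains i && c.contains j then some (c :: rest)
    else (pvA_scan rest i j).map (c :: ·)

-- body of `if relation[i][j]:`
def pvA_body (classes : List (List Int)) (i j : Int) : List (List Int) :=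
  if classes.isEmpty then classes ++ [pvA_new i j]
  else
    match pvA_scan classes i j with
    | some cs => cs
    | none => classes ++ [pvA_new i j]

def equality_classes (relation : List (List Int)) : List (List Int) :=
  (PySem.List.pyRange 0 (relation.length : Int) 1).foldl (fun classes i =>
    (PySem.List.pyRange 0 (relation.length : Int) 1).foldl (fun classes j =>
      -- relation[i][j]; Pre_ keeps the indexing in range, the .getD defaults are never used there
      if (PySem.List.pyGet? ((PySem.List.pyGet? relation i).getD []) j).getD 0 ≠ 0
      then pvA_body classes i j else classes) classes) []

-- ===== PORT B =====
-- buckets[k].append(x)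
def pvB_appendAt (bs : List (List Int)) (k : Nat) (x : Int) : List (List Int) :=
  bs.set k (bs.getD k [] ++ [x])

-- pass 2: buckets = [[] for _ in range(nclasses)]; for k, x in events: buckets[k].append(x)
def pvB_bucket (n : Nat) (events : List (Nat × Int)) : List (List Int) :=
  events.foldl (fun bs e => pvB_appendAt bs e.1 e.2) (List.replicate n [])

-- body of `if row[j]:` on the state (nclasses, first, events)
def pvB_body (st : Nat × PySem.Dict Int Nat × List (Nat × Int)) (i j : Int) :
    Nat × PySem.Dict Int Nat × List (Nat × Int) :=
  match st.2.1.get? i, st.2.1.get? j with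
  | none, none =>
      (st.1 + 1, (st.2.1.insert i st.1).insert j st.1,
        st.2.2 ++ (if i = j then [(st.1, i)] else [(st.1, i), (st.1, j)]))
  | some fi, none => (st.1, st.2.1.insert j fi, st.2.2 ++ [(fi, j)])
  | none, some fj => (st.1, st.2.1.insert i fj, st.2.2 ++ [(fj, i)])
  | some fi, some fj =>
      if fi < fj then (st.1, st.2.1.insert j fi, st.2.2 ++ [(fi, j)])
      else if fj < fi then (st.1, st.2.1.insert i fj, st.2.2 ++ [(fj, i)])
      else st

def equality_classes_alt (relation : List (List Int)) : List (List Int) :=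
  let fin := (PySem.List.pyRange 0 (relation.length : Int) 1).foldl (fun st i =>
    let row := (PySem.List.pyGet? relation i).getD []
    (PySem.List.pyRange 0 (relation.length : Int) 1).foldl (fun st j =>
      if (PySem.List.pyGet? row j).getD 0 ≠ 0 then pvB_body st i j else st) st)
    (0, PySem.Dict.empty, [])
  pvB_bucket fin.1 fin.2.2

-- ===== PRECONDITION & SPEC =====
-- Python A indexes relation[i][j] for all i, j < len(relation): it raises IndexError
-- exactly when some row is shorter than the number of rows; Pre_ excludes only that.
def Pre_equality_classes (relation : List (List Int)) : Prop :=
  ∀ row ∈ relation, relation.length ≤ row.length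
instance (relation : List (List Int)) : Decidable (Pre_equality_classes relation) := by
  unfold Pre_equality_classes; infer_instance

def pvWitness_equality_classes : List (List Int) := [[1, 1], [0, 1]]

def Spec_equality_classes (relation : List (List Int)) (out : List (List Int)) : Prop :=
  out = equality_classes_alt relation
instance (relation : List (List Int)) (out : List (List Int)) :
    Decidable (Spec_equality_classes relation out) := by
  unfold Spec_equality_classes; infer_instance

-- ===== CLAIM (what is proved, stated in full; the proofs are below) =====
def Claim_equal_equality_classes : Prop :=
  ∀ (relation : List (List Int)), Dom_equality_classes relation →
    Pre_equality_classes relation →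
    Spec_equality_classes relation (equality_classes relation)

-- ===== LEMMAS AND PROOFS =====

-- ghost intermediate program: A's classes-list semantics driven by a first-class map;
-- used only in the proofs, to split A = ghost (scan characterisation) and ghost = B (bucketing)
def pvG_new (i j : Int) : List Int := if i = j then [i] else [i, j]

def pvG_body (st : List (List Int) × PySem.Dict Int Nat) (i j : Int) :
    List (List Int) × PySem.Dict Int Nat :=
  match st.2.get? i, st.2.get? j with
  | none, none =>
      (st.1 ++ [pvG_new i j], (st.2.insert i st.1.length).insert j st.1.length)
  | some fi, none => (pvB_appendAt st.1 fi j, st.2.insert j fi)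
  | none, some fj => (pvB_appendAt st.1 fj i, st.2.insert i fj)
  | some fi, some fj =>
      if fi < fj then (pvB_appendAt st.1 fi j, st.2.insert j fi)
      else if fj < fi then (pvB_appendAt st.1 fj i, st.2.insert i fj)
      else st

-- invariant: the dictionary holds, for every element, the index of the first class containing it
def pvInv (classes : List (List Int)) (d : PySem.Dict Int Nat) : Prop :=
  ∀ x : Int, d.get? x = classes.findIdx? (fun c => c.contains x)

-- the pure effect of pvG_body on the classes list, as a function of the two lookups
def pvGStep (classes : List (List Int)) (i j : Int) (fi fj : Option Nat) : List (List Int) :=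
  match fi, fj with
  | none, none => classes ++ [pvG_new i j]
  | some fi, none => pvB_appendAt classes fi j
  | none, some fj => pvB_appendAt classes fj i
  | some fi, some fj =>
      if fi < fj then pvB_appendAt classes fi j
      else if fj < fi then pvB_appendAt classes fj i
      else classes

lemma pvG_body_fst (classes : List (List Int)) (d : PySem.Dict Int Nat) (i j : Int) :
    (pvG_body (classes, d) i j).1 = pvGStep classes i j (d.get? i) (d.get? j) := by
  cases h1 : d.get? i <;> cases h2 : d.get? j <;>
    (simp only [pvG_body, pvGStep, h1, h2]; try (split_ifs <;> rfl))

lemma pvNew_eq (i j : Int) : pvA_new i j = pvG_new i j := by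
  by_cases h : i = j <;> simp [pvA_new, pvG_new, h]

lemma pvAppendAt_cons (c : List Int) (rest : List (List Int)) (k : Nat) (x : Int) :
    pvB_appendAt (c :: rest) (k + 1) x = c :: pvB_appendAt rest k x := by
  simp [pvB_appendAt]

lemma pvGStep_cons (c : List Int) (rest : List (List Int)) (i j : Int) (fi fj : Option Nat) :
    pvGStep (c :: rest) i j (fi.map (· + 1)) (fj.map (· + 1)) = c :: pvGStep rest i j fi fj := by
  cases fi <;> cases fj <;>
    simp only [pvGStep, Option.map_none, Option.map_some]
  · rfl
  · simp [pvAppendAt_cons]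
  · simp [pvAppendAt_cons]
  · rename_i k l
    by_cases hkl : k < l
    · simp [hkl, pvAppendAt_cons]
    · by_cases hlk : l < k <;> simp [hkl, hlk, pvAppendAt_cons]

lemma pvScan_gStep : ∀ (classes : List (List Int)) (i j : Int),
    (match pvA_scan classes i j with
     | some cs => cs
     | none => classes ++ [pvA_new i j])
    = pvGStep classes i j (classes.findIdx? (fun c => c.contains i))
        (classes.findIdx? (fun c => c.contains j))
  | [], i, j => by simp [pvA_scan, pvGStep, pvNew_eq]
  | c :: rest, i, j => by
    by_cases hi : c.contains i = true <;> by_cases hj : c.contains j = true <;>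
      rw [List.findIdx?_cons, List.findIdx?_cons]
    · -- both
      rw [if_pos hi, if_pos hj]
      have him : i ∈ c := by simpa using hi
      have hjm : j ∈ c := by simpa using hj
      simp [pvA_scan, him, hjm, pvGStep]
    · -- i yes, j no
      rw [if_pos hi, if_neg hj]
      have him : i ∈ c := by simpa using hi
      have hjm : j ∉ c := by simpa using hj
      cases hfj : rest.findIdx? (fun c => c.contains j) <;>
        simp [pvA_scan, him, hjm, pvGStep, pvB_appendAt]
    · -- j yes, i no
      rw [if_neg hi, if_pos hj]
      have him : i ∉ c := by simpa using hi
      have hjm : j ∈ c := by simpa using hj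
      cases hfi : rest.findIdx? (fun c => c.contains i) <;>
        simp [pvA_scan, him, hjm, pvGStep, pvB_appendAt]
    · -- neither
      rw [if_neg hi, if_neg hj]
      have hsplit : (match pvA_scan (c :: rest) i j with
          | some cs => cs
          | none => (c :: rest) ++ [pvA_new i j])
          = c :: (match pvA_scan rest i j with
              | some cs => cs
              | none => rest ++ [pvA_new i j]) := by
        have him : i ∉ c := by simpa using hi
        have hjm : j ∉ c := by simpa using hj
        simp only [pvA_scan, List.cons_append]
        rw [if_neg (by simp [him]), if_neg (by simp [hjm]), if_neg (by simp [him])]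
        cases pvA_scan rest i j <;> rfl
      rw [hsplit, pvScan_gStep rest i j]
      exact (pvGStep_cons c rest i j _ _).symm

lemma pvA_body_eq_scan (classes : List (List Int)) (i j : Int) :
    pvA_body classes i j
      = match pvA_scan classes i j with
        | some cs => cs
        | none => classes ++ [pvA_new i j] := by
  cases classes <;> simp [pvA_body, pvA_scan]

lemma pvStep_eq (classes : List (List Int)) (d : PySem.Dict Int Nat) (i j : Int)
    (h : pvInv classes d) :
    pvA_body classes i j = (pvG_body (classes, d) i j).1 := by
  rw [pvG_body_fst, h i, h j, pvA_body_eq_scan, pvScan_gStep]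

-- appending y to some class does not change where any other element is first found
lemma pvFIdx_appendAt_ne (x y : Int) (hxy : x ≠ y) :
    ∀ (classes : List (List Int)) (k : Nat),
      (pvB_appendAt classes k y).findIdx? (fun c => c.contains x)
        = classes.findIdx? (fun c => c.contains x)
  | [], k => by simp [pvB_appendAt]
  | c :: rest, 0 => by
    have hc : (c ++ [y]).contains x = c.contains x := by simp [hxy]
    rw [show pvB_appendAt (c :: rest) 0 y = (c ++ [y]) :: rest by simp [pvB_appendAt]]
    rw [List.findIdx?_cons, List.findIdx?_cons, hc]
  | c :: rest, k + 1 => by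
    rw [pvAppendAt_cons, List.findIdx?_cons, List.findIdx?_cons,
      pvFIdx_appendAt_ne x y hxy rest k]
lemma pvFIdx_appendAt_self (y : Int) :
    ∀ (classes : List (List Int)) (k : Nat), k < classes.length →
      (∀ m, m < k → (classes.getD m []).contains y = false) →
      (pvB_appendAt classes k y).findIdx? (fun c => c.contains y) = some k
  | [], k, hk, _ => by simp at hk
  | c :: rest, 0, _, _ => by
    rw [show pvB_appendAt (c :: rest) 0 y = (c ++ [y]) :: rest by simp [pvB_appendAt]]
    rw [List.findIdx?_cons, if_pos (by simp)]
  | c :: rest, k + 1, hk, hbef => by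
    have hc : c.contains y = false := hbef 0 (by omega)
    have hc' : y ∉ c := by simpa using hc
    rw [pvAppendAt_cons, List.findIdx?_cons, if_neg (by simpa using hc'),
      pvFIdx_appendAt_self y rest k (by simpa using hk)
        (fun m hm => hbef (m + 1) (by omega))]
    rfl
lemma pvBefore_of_none {classes : List (List Int)} {y : Int}
    (hnone : classes.findIdx? (fun c => c.contains y) = none) :
    ∀ m, m < classes.length → (classes.getD m []).contains y = false := by
  intro m hm
  rw [List.getD_eq_getElem?_getD, List.getElem?_eq_getElem hm]
  exact List.findIdx?_eq_none_iff.mp hnone _ (List.getElem_mem hm)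
lemma pvBefore_of_some {classes : List (List Int)} {y : Int} {f : Nat}
    (hsome : classes.findIdx? (fun c => c.contains y) = some f) :
    ∀ m, m < f → (classes.getD m []).contains y = false := by
  obtain ⟨hlen, _, hmin⟩ := List.findIdx?_eq_some_iff_getElem.mp hsome
  intro m hm
  rw [List.getD_eq_getElem?_getD, List.getElem?_eq_getElem (by omega)]
  simpa using hmin m hm
lemma pvFIdx_lt_length {classes : List (List Int)} {y : Int} {f : Nat}
    (hsome : classes.findIdx? (fun c => c.contains y) = some f) : f < classes.length :=
  (List.findIdx?_eq_some_iff_getElem.mp hsome).1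
lemma pvInv_step (classes : List (List Int)) (d : PySem.Dict Int Nat) (i j : Int)
    (h : pvInv classes d) :
    pvInv (pvG_body (classes, d) i j).1 (pvG_body (classes, d) i j).2 := by
  have hi := h i
  have hj := h j
  cases h1 : d.get? i <;> cases h2 : d.get? j
  · -- fresh pair
    intro x
    simp only [pvG_body, h1, h2]
    rw [PySem.Dict.get?_insert, PySem.Dict.get?_insert, List.findIdx?_append, h x]
    by_cases hxj : x = j
    · have hmem : j ∈ pvG_new i j := by
        by_cases hij : i = j <;> simp [pvG_new, hij]
      rw [if_pos hxj, hxj, ← hj, h2]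
      simp [hmem]
    · by_cases hxi : x = i
      · have hmem : i ∈ pvG_new i j := by
          by_cases hij : i = j <;> simp [pvG_new, hij]
        rw [if_neg hxj, if_pos hxi, hxi, ← hi, h1]
        simp [hmem]
      · have hmem : x ∉ pvG_new i j := by
          by_cases hij : i = j <;> simp [pvG_new, hij, hxi, hxj]
        rw [if_neg hxj, if_neg hxi]
        simp [hmem]
  · -- j known, i fresh
    rename_i fj
    have hjf : classes.findIdx? (fun c => c.contains j) = some fj := (h2 ▸ hj).symm
    have hif : classes.findIdx? (fun c => c.contains i) = none := (h1 ▸ hi).symm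
    intro x
    simp only [pvG_body, h1, h2]
    rw [PySem.Dict.get?_insert]
    by_cases hxi : x = i
    · rw [if_pos hxi, hxi]
      exact (pvFIdx_appendAt_self i classes fj (pvFIdx_lt_length hjf)
        (fun m hm => pvBefore_of_none hif m (by have := pvFIdx_lt_length hjf; omega))).symm
    · rw [if_neg hxi, h x, pvFIdx_appendAt_ne x i hxi]
  · -- i known, j fresh
    rename_i fi
    have hif : classes.findIdx? (fun c => c.contains i) = some fi := (h1 ▸ hi).symm
    have hjf : classes.findIdx? (fun c => c.contains j) = none := (h2 ▸ hj).symm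
    intro x
    simp only [pvG_body, h1, h2]
    rw [PySem.Dict.get?_insert]
    by_cases hxj : x = j
    · rw [if_pos hxj, hxj]
      exact (pvFIdx_appendAt_self j classes fi (pvFIdx_lt_length hif)
        (fun m hm => pvBefore_of_none hjf m (by have := pvFIdx_lt_length hif; omega))).symm
    · rw [if_neg hxj, h x, pvFIdx_appendAt_ne x j hxj]
  · -- both known
    rename_i fi fj
    have hif : classes.findIdx? (fun c => c.contains i) = some fi := (h1 ▸ hi).symm
    have hjf : classes.findIdx? (fun c => c.contains j) = some fj := (h2 ▸ hj).symm
    by_cases hij : fi < fj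
    · intro x
      simp only [pvG_body, h1, h2, if_pos hij]
      rw [PySem.Dict.get?_insert]
      by_cases hxj : x = j
      · rw [if_pos hxj, hxj]
        exact (pvFIdx_appendAt_self j classes fi (pvFIdx_lt_length hif)
          (fun m hm => pvBefore_of_some hjf m (by omega))).symm
      · rw [if_neg hxj, h x, pvFIdx_appendAt_ne x j hxj]
    · by_cases hji : fj < fi
      · intro x
        simp only [pvG_body, h1, h2, if_neg hij, if_pos hji]
        rw [PySem.Dict.get?_insert]
        by_cases hxi : x = i
        · rw [if_pos hxi, hxi]
          exact (pvFIdx_appendAt_self i classes fj (pvFIdx_lt_length hjf)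
            (fun m hm => pvBefore_of_some hif m (by omega))).symm
        · rw [if_neg hxi, h x, pvFIdx_appendAt_ne x i hxi]
      · simpa only [pvG_body, h1, h2, if_neg hij, if_neg hji] using h

-- ===== bucketing lemmas: ghost classes = buckets of the event log =====
lemma pvAppendAt_length (bs : List (List Int)) (k : Nat) (x : Int) :
    (pvB_appendAt bs k x).length = bs.length := by
  simp [pvB_appendAt]

lemma pvAppendAt_append_lt (acc tl : List (List Int)) (k : Nat) (x : Int)
    (hk : k < acc.length) :
    pvB_appendAt (acc ++ tl) k x = pvB_appendAt acc k x ++ tl := by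
  unfold pvB_appendAt
  rw [List.getD_eq_getElem?_getD, List.getD_eq_getElem?_getD,
    List.getElem?_append_left hk, List.set_append_left _ _ hk]

lemma pvAppendAt_snoc_last (acc : List (List Int)) (c : List Int) (x : Int) :
    pvB_appendAt (acc ++ [c]) acc.length x = acc ++ [c ++ [x]] := by
  unfold pvB_appendAt
  rw [List.getD_eq_getElem?_getD, List.getElem?_append_right (by omega)]
  simp

lemma pvBucket_snoc (n : Nat) (ev : List (Nat × Int)) (e : Nat × Int) :
    pvB_bucket n (ev ++ [e]) = pvB_appendAt (pvB_bucket n ev) e.1 e.2 := by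
  simp [pvB_bucket, List.foldl_append]

lemma pvBucket_succ (n : Nat) (ev : List (Nat × Int)) (hev : ∀ e ∈ ev, e.1 < n) :
    pvB_bucket (n + 1) ev = pvB_bucket n ev ++ [[]] := by
  unfold pvB_bucket
  rw [List.replicate_succ']
  suffices h : ∀ (ev : List (Nat × Int)) (acc : List (List Int)),
      (∀ e ∈ ev, e.1 < acc.length) →
      ev.foldl (fun bs e => pvB_appendAt bs e.1 e.2) (acc ++ [[]])
        = ev.foldl (fun bs e => pvB_appendAt bs e.1 e.2) acc ++ [[]] by
    exact h ev _ (by simpa using hev)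
  intro ev
  induction ev with
  | nil => intro acc _; rfl
  | cons e ev ih =>
    intro acc hb
    rw [List.foldl_cons, List.foldl_cons,
      pvAppendAt_append_lt acc [[]] e.1 e.2 (hb e (by simp))]
    exact ih _ (fun e' he' => by rw [pvAppendAt_length]; exact hb e' (by simp [he']))

-- coupling between the ghost state and B's (nclasses, first, events) state
def pvCouple (g : List (List Int) × PySem.Dict Int Nat)
    (b : Nat × PySem.Dict Int Nat × List (Nat × Int)) : Prop :=
  b.1 = g.1.length ∧ b.2.1 = g.2 ∧ pvB_bucket b.1 b.2.2 = g.1 ∧ ∀ e ∈ b.2.2, e.1 < b.1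

lemma pvCouple_append (classes : List (List Int)) (n : Nat) (ev : List (Nat × Int))
    (dd : PySem.Dict Int Nat) (f : Nat) (x : Int)
    (hn : n = classes.length) (hbk : pvB_bucket n ev = classes)
    (hbd : ∀ e ∈ ev, e.1 < n) (hf : f < n) :
    pvCouple (pvB_appendAt classes f x, dd) (n, dd, ev ++ [(f, x)]) := by
  unfold pvCouple
  refine ⟨by simp [pvAppendAt_length, hn], rfl, ?_, ?_⟩
  · show pvB_bucket n (ev ++ [(f, x)]) = pvB_appendAt classes f x
    rw [pvBucket_snoc, hbk]
  · intro e he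
    rcases List.mem_append.mp he with h | h
    · exact hbd e h
    · have h' : e = (f, x) := by simpa using h
      simp [h', hf]

lemma pvCouple_step (classes : List (List Int)) (d : PySem.Dict Int Nat)
    (n : Nat) (ev : List (Nat × Int)) (i j : Int)
    (hinv : pvInv classes d) (hn : n = classes.length)
    (hbk : pvB_bucket n ev = classes) (hbd : ∀ e ∈ ev, e.1 < n) :
    pvCouple (pvG_body (classes, d) i j) (pvB_body (n, d, ev) i j) := by
  cases h1 : d.get? i <;> cases h2 : d.get? j
  · -- fresh pair: a new class is created
    have hsucc : pvB_bucket (n + 1) ev = classes ++ [[]] := by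
      rw [pvBucket_succ n ev hbd, hbk]
    simp only [pvG_body, pvB_body, h1, h2]
    unfold pvCouple
    refine ⟨by simp [hn], by simp [hn], ?_, ?_⟩
    · by_cases hij : i = j
      · rw [if_pos hij]
        show pvB_bucket (n + 1) (ev ++ [(n, i)]) = classes ++ [pvG_new i j]
        rw [pvBucket_snoc, hsucc, hn]
        have h' := pvAppendAt_snoc_last classes [] i
        simpa [pvG_new, hij] using h'
      · rw [if_neg hij]
        show pvB_bucket (n + 1) (ev ++ [(n, i), (n, j)]) = classes ++ [pvG_new i j]
        have hsplit : ev ++ [(n, i), (n, j)] = (ev ++ [(n, i)]) ++ [(n, j)] := by simp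
        rw [hsplit, pvBucket_snoc, pvBucket_snoc, hsucc, hn]
        have h1' := pvAppendAt_snoc_last classes [] i
        have h2' := pvAppendAt_snoc_last classes [i] j
        simp only [List.nil_append] at h1'
        simp only [h1']
        simpa [pvG_new, hij] using h2'
    · intro e he
      by_cases hij : i = j
      · rw [if_pos hij] at he
        rcases List.mem_append.mp he with h | h
        · exact Nat.lt_succ_of_lt (hbd e h)
        · have h' : e = (n, i) := by simpa using h
          simp [h']
      · rw [if_neg hij] at he
        rcases List.mem_append.mp he with h | h
        · exact Nat.lt_succ_of_lt (hbd e h)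
        · rcases (by simpa using h : e = (n, i) ∨ e = (n, j)) with h' | h' <;> simp [h']
  · -- j known, i fresh
    rename_i fj
    have hfj : fj < n := by
      rw [hn]; exact pvFIdx_lt_length ((h2 ▸ hinv j).symm)
    simp only [pvG_body, pvB_body, h1, h2]
    exact pvCouple_append classes n ev _ fj i hn hbk hbd hfj
  · -- i known, j fresh
    rename_i fi
    have hfi : fi < n := by
      rw [hn]; exact pvFIdx_lt_length ((h1 ▸ hinv i).symm)
    simp only [pvG_body, pvB_body, h1, h2]
    exact pvCouple_append classes n ev _ fi j hn hbk hbd hfi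
  · -- both known
    rename_i fi fj
    have hfi : fi < n := by
      rw [hn]; exact pvFIdx_lt_length ((h1 ▸ hinv i).symm)
    have hfj : fj < n := by
      rw [hn]; exact pvFIdx_lt_length ((h2 ▸ hinv j).symm)
    by_cases hlt : fi < fj
    · simp only [pvG_body, pvB_body, h1, h2, if_pos hlt]
      exact pvCouple_append classes n ev _ fi j hn hbk hbd hfi
    · by_cases hgt : fj < fi
      · simp only [pvG_body, pvB_body, h1, h2, if_neg hlt, if_pos hgt]
        exact pvCouple_append classes n ev _ fj i hn hbk hbd hfj
      · simp only [pvG_body, pvB_body, h1, h2, if_neg hlt, if_neg hgt]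
        exact ⟨hn, rfl, hbk, hbd⟩

-- the inner loop over j, for a fixed i and a fixed guard: A's fold, the ghost fold and
-- B's fold stay in lockstep
lemma pvFold_inner (i : Int) (P : Int → Prop) [DecidablePred P] :
    ∀ (js : List Int) (g : List (List Int) × PySem.Dict Int Nat)
      (b : Nat × PySem.Dict Int Nat × List (Nat × Int)),
      pvInv g.1 g.2 → pvCouple g b →
      (js.foldl (fun cs j => if P j then pvA_body cs i j else cs) g.1
        = (js.foldl (fun st j => if P j then pvG_body st i j else st) g).1)
      ∧ pvInv (js.foldl (fun st j => if P j then pvG_body st i j else st) g).1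
          (js.foldl (fun st j => if P j then pvG_body st i j else st) g).2
      ∧ pvCouple (js.foldl (fun st j => if P j then pvG_body st i j else st) g)
          (js.foldl (fun st j => if P j then pvB_body st i j else st) b)
  | [], g, b, h, hc => ⟨rfl, h, hc⟩
  | j :: js, g, b, h, hc => by
    obtain ⟨classes, d⟩ := g
    obtain ⟨n, d', ev⟩ := b
    obtain ⟨hn, hd, hbk, hbd⟩ := hc
    simp only at hn hd hbk hbd
    subst hd
    simp only [List.foldl_cons]
    by_cases hg : P j
    · rw [if_pos hg, if_pos hg, if_pos hg, pvStep_eq classes d' i j h]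
      exact pvFold_inner i P js (pvG_body (classes, d') i j) (pvB_body (n, d', ev) i j)
        (pvInv_step classes d' i j h)
        (pvCouple_step classes d' n ev i j h hn hbk hbd)
    · rw [if_neg hg, if_neg hg, if_neg hg]
      exact pvFold_inner i P js (classes, d') (n, d', ev) h ⟨hn, rfl, hbk, hbd⟩

-- the outer loop over i
lemma pvFold_outer (relation : List (List Int)) :
    ∀ (is : List Int) (g : List (List Int) × PySem.Dict Int Nat)
      (b : Nat × PySem.Dict Int Nat × List (Nat × Int)),
      pvInv g.1 g.2 → pvCouple g b →
      (is.foldl (fun classes i =>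
          (PySem.List.pyRange 0 (relation.length : Int) 1).foldl (fun classes j =>
            if (PySem.List.pyGet? ((PySem.List.pyGet? relation i).getD []) j).getD 0 ≠ 0
            then pvA_body classes i j else classes) classes) g.1
        = (is.foldl (fun st i =>
            (PySem.List.pyRange 0 (relation.length : Int) 1).foldl (fun st j =>
              if (PySem.List.pyGet? ((PySem.List.pyGet? relation i).getD []) j).getD 0 ≠ 0
              then pvG_body st i j else st) st) g).1)
      ∧ pvCouple (is.foldl (fun st i =>
            (PySem.List.pyRange 0 (relation.length : Int) 1).foldl (fun st j =>
              if (PySem.List.pyGet? ((PySem.List.pyGet? relation i).getD []) j).getD 0 ≠ 0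
              then pvG_body st i j else st) st) g)
          (is.foldl (fun st i =>
            let row := (PySem.List.pyGet? relation i).getD []
            (PySem.List.pyRange 0 (relation.length : Int) 1).foldl (fun st j =>
              if (PySem.List.pyGet? row j).getD 0 ≠ 0 then pvB_body st i j else st) st) b)
  | [], g, b, h, hc => ⟨rfl, hc⟩
  | i :: is, g, b, h, hc => by
    obtain ⟨heq, hinv, hc'⟩ := pvFold_inner i
      (fun j => (PySem.List.pyGet? ((PySem.List.pyGet? relation i).getD []) j).getD 0 ≠ 0)
      (PySem.List.pyRange 0 (relation.length : Int) 1) g b h hc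
    obtain ⟨heq2, hc2⟩ := pvFold_outer relation is _ _ hinv hc'
    simp only [List.foldl_cons]
    exact ⟨by rw [heq]; exact heq2, hc2⟩

lemma pvInv_init : pvInv [] PySem.Dict.empty := by
  intro x
  simp [PySem.Dict.get?_empty]

lemma pvCouple_init : pvCouple ([], PySem.Dict.empty) (0, PySem.Dict.empty, []) :=
  ⟨rfl, rfl, rfl, by simp⟩

-- ===== VERDICT (by name: the statement is the Claim_ definition above) =====
theorem equality_classes_spec : Claim_equal_equality_classes := by
  intro relation _ _
  unfold Spec_equality_classes equality_classes equality_classes_alt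
  obtain ⟨heq, _, _, hbk, _⟩ := pvFold_outer relation
    (PySem.List.pyRange 0 (relation.length : Int) 1)
    ([], PySem.Dict.empty) (0, PySem.Dict.empty, []) pvInv_init pvCouple_init
  rw [heq, ← hbk]
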